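-- pv_equiv track=rewrite | github.com/neelshingavi/SQLSage | sqlsage/generate_cheatsheets.py | _is_gfm_table_separator
-- ===== SOURCE A (Python) =====
-- def _is_gfm_table_separator(cells: list[str]) -> bool:
--     if not cells:
--         return False
--     for c in cells:
--         t = c.strip()
--         t = t.replace(" ", "").lstrip(":").rstrip(":")
--         if not t or not all(ch == "-" for ch in t):
--             return False
--     return True
-- ===== SOURCE B (Python) =====
-- # B: single left-to-right finite-state scan per cell (states: leading colons /
-- # dashes / trailing colons / reject), instead of A's strip/replace/lstrip/rstrip
-- # normalisation followed by a separate all-'-' scan.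
--
-- def _cell_ok(c: str) -> bool:
--     state = 0  # 0: leading colons, 1: dashes, 2: trailing colons, 3: reject
--     for ch in c.strip():
--         if ch == ' ':
--             continue  # spaces are ignored anywhere (A removes them all)
--         if state == 0:
--             state = 0 if ch == ':' else 1 if ch == '-' else 3
--         elif state == 1:
--             state = 1 if ch == '-' else 2 if ch == ':' else 3
--         elif state == 2:
--             state = 2 if ch == ':' else 3
--     return state == 1 or state == 2
--
--
-- def _is_gfm_table_separator(cells: list[str]) -> bool:
--     if not cells:
--         return False
--     for c in cells:
--         if not _cell_ok(c):
--             return False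
--     return True
-- ===== Notes on version B (the rewrite author's own statement) =====
-- stated objective: alternative
-- what changed: Replaces A's multi-pass normalisation per cell (strip, replace spaces, lstrip/rstrip colons, then an all-'-' scan) with a single left-to-right finite-state scan (leading colons / dashes / trailing colons / reject) over the stripped cell.
import Mathlib
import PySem

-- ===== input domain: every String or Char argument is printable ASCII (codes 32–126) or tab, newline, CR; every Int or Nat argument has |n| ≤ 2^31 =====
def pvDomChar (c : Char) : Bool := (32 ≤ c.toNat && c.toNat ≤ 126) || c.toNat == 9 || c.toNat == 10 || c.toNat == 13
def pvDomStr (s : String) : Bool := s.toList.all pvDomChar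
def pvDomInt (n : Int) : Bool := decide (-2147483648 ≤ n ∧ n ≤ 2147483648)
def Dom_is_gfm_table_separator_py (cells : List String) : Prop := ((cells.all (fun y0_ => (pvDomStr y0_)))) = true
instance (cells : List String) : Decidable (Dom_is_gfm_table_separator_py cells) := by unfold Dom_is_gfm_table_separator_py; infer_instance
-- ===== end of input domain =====

-- B replaces A's per-cell multi-pass normalisation with a single finite-state scan; the return values agree on all inputs.
-- ===== PORT A =====
-- lstrip(":") / rstrip(":") are single-character strip sets: ported by hand as dropWhile / reverse-dropWhile-reverse (exact).
def is_gfm_table_separator_py (cells : List String) : Bool :=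
  if cells.isEmpty then false
  else
    cells.all (fun c =>
      let t1 := PySem.Chars.strip c.toList
      let t2 := PySem.Chars.replace t1 [' '] []
      let t3 := t2.dropWhile (· == ':')
      let t4 := (t3.reverse.dropWhile (· == ':')).reverse
      !(t4.isEmpty || !(t4.all (· == '-'))))

-- ===== PORT B =====
-- per-cell DFA: state 0 = leading colons, 1 = dashes, 2 = trailing colons, 3 = reject; spaces are skipped
def pvDfaStep (st : Nat) (ch : Char) : Nat :=
  if ch == ' ' then st
  else if st == 0 then (if ch == ':' then 0 else if ch == '-' then 1 else 3)
  else if st == 1 then (if ch == '-' then 1 else if ch == ':' then 2 else 3)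
  else if st == 2 then (if ch == ':' then 2 else 3)
  else st

def pvCellOk (c : String) : Bool :=
  let st := (PySem.Chars.strip c.toList).foldl pvDfaStep 0
  st == 1 || st == 2

def is_gfm_table_separator_py_alt (cells : List String) : Bool :=
  if cells.isEmpty then false else cells.all pvCellOk

-- ===== PRECONDITION & SPEC =====
def Spec_is_gfm_table_separator_py (cells : List String) (out : Bool) : Prop := out = is_gfm_table_separator_py_alt cells
instance (cells : List String) (out : Bool) : Decidable (Spec_is_gfm_table_separator_py cells out) := by unfold Spec_is_gfm_table_separator_py; infer_instance

-- ===== CLAIM (what is proved, stated in full; the proofs are below) =====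
def Claim_equal_is_gfm_table_separator_py : Prop := ∀ (cells : List String), Dom_is_gfm_table_separator_py cells → Spec_is_gfm_table_separator_py cells (is_gfm_table_separator_py cells)

-- ===== LEMMAS AND PROOFS =====

-- replace(" ", "") is a filter
lemma pv_replace_go_space : ∀ (fuel : Nat) (l acc : List Char), l.length ≤ fuel →
    PySem.Chars.replace.go [' '] [] fuel l acc = acc.reverse ++ l.filter (fun c => !(c == ' ')) := by
  intro fuel
  induction fuel with
  | zero =>
    intro l acc h
    have : l = [] := List.eq_nil_of_length_eq_zero (Nat.le_zero.mp h)
    subst this; simp [PySem.Chars.replace.go]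
  | succ n ih =>
    intro l acc h
    cases l with
    | nil => simp [PySem.Chars.replace.go]
    | cons c t =>
      by_cases hc : c = ' '
      · subst hc
        have hpre : [' '].isPrefixOf (' ' :: t) = true := by simp [List.isPrefixOf]
        simp only [PySem.Chars.replace.go, hpre, if_pos]
        rw [show List.drop [' '].length (' ' :: t) = t from rfl,
          show ([] : List Char).reverse ++ acc = acc from rfl]
        rw [ih t acc (by simpa using Nat.le_of_succ_le_succ h)]
        simp
      · have hpre : [' '].isPrefixOf (c :: t) = false := by
          simp [List.isPrefixOf]; exact fun hh => (hc hh.symm).elim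
        simp only [PySem.Chars.replace.go, hpre]
        rw [if_neg (by simp)]
        rw [ih t (c :: acc) (by simpa using Nat.le_of_succ_le_succ h)]
        simp [hc]

lemma pv_replace_space (l : List Char) :
    PySem.Chars.replace l [' '] [] = l.filter (fun c => !(c == ' ')) := by
  rw [PySem.Chars.replace]
  rw [if_neg (by simp)]
  simpa using pv_replace_go_space l.length l [] (le_refl _)

-- the DFA ignores spaces
lemma pv_foldl_dfa_filter : ∀ (l : List Char) (s : Nat),
    l.foldl pvDfaStep s = (l.filter (fun c => !(c == ' '))).foldl pvDfaStep s := by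
  intro l
  induction l with
  | nil => intro s; rfl
  | cons c t ih =>
    intro s
    by_cases hc : c = ' '
    · subst hc; simp [List.foldl_cons, pvDfaStep, ih]
    · simp [List.foldl_cons, hc, ih]

-- state 3 is absorbing
lemma pv_foldl_dfa3 : ∀ (l : List Char), l.foldl pvDfaStep 3 = 3 := by
  intro l
  induction l with
  | nil => rfl
  | cons c t ih =>
    have hstep : pvDfaStep 3 c = 3 := by simp [pvDfaStep]
    rw [List.foldl_cons, hstep]; exact ih

-- leading colons are skipped from state 0
lemma pv_foldl_dfa0_dropColon : ∀ (u : List Char),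
    u.foldl pvDfaStep 0 = (u.dropWhile (· == ':')).foldl pvDfaStep 0 := by
  intro u
  induction u with
  | nil => rfl
  | cons c t ih =>
    by_cases hc : c = ':'
    · subst hc
      rw [List.dropWhile_cons_of_pos (by simp)]
      simpa [List.foldl_cons, pvDfaStep] using ih
    · rw [List.dropWhile_cons_of_neg (by simp [hc])]

-- dashes are skipped from state 1
lemma pv_foldl_dfa1_dropDash : ∀ (w : List Char),
    w.foldl pvDfaStep 1 = (w.dropWhile (· == '-')).foldl pvDfaStep 1 := by
  intro w
  induction w with
  | nil => rfl
  | cons c t ih =>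
    by_cases hc : c = '-'
    · subst hc
      rw [List.dropWhile_cons_of_pos (by simp)]
      simpa [List.foldl_cons, pvDfaStep] using ih
    · rw [List.dropWhile_cons_of_neg (by simp [hc])]

-- from state 2 (space-free input): accept iff all colons
lemma pv_dfa2_accept : ∀ (w : List Char), (' ' ∉ w) →
    ((w.foldl pvDfaStep 2 == 1 || w.foldl pvDfaStep 2 == 2) = w.all (· == ':')) := by
  intro w
  induction w with
  | nil => intro _; rfl
  | cons c t ih =>
    intro hs
    have hc : c ≠ ' ' := fun h => hs (h ▸ List.mem_cons_self ..)
    have ht : ' ' ∉ t := fun h => hs (List.mem_cons_of_mem _ h)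
    by_cases hcol : c = ':'
    · subst hcol
      simp only [List.foldl_cons, pvDfaStep]
      rw [if_neg (by simp), if_neg (by simp), if_neg (by simp), if_pos (by simp), if_pos (by simp)]
      simpa using ih ht
    · simp only [List.foldl_cons, pvDfaStep]
      rw [if_neg (by simp [hc]), if_neg (by simp), if_neg (by simp), if_pos (by simp),
        if_neg (by simp [hcol])]
      simp [pv_foldl_dfa3, hcol]

-- from state 1 (space-free input): accept iff after the dashes only colons remain
lemma pv_dfa1_accept : ∀ (w : List Char), (' ' ∉ w) →
    ((w.foldl pvDfaStep 1 == 1 || w.foldl pvDfaStep 1 == 2)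
      = (w.dropWhile (· == '-')).all (· == ':')) := by
  intro w hs
  rw [pv_foldl_dfa1_dropDash]
  cases he : w.dropWhile (· == '-') with
  | nil => rfl
  | cons d e =>
    have hdmem : d ∈ w := by
      have := List.dropWhile_sublist (l := w) (p := (· == '-'))
      rw [he] at this
      exact this.mem (List.mem_cons_self ..)
    have hd : d ≠ ' ' := fun h => hs (h ▸ hdmem)
    have hdd : (d == '-') = false := by
      have h0 := List.head_dropWhile_not (· == '-') (l := w) (by simp [he])
      simp only [he, List.head_cons] at h0
      exact h0
    have hemem : ' ' ∉ e := by
      intro h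
      have := List.dropWhile_sublist (l := w) (p := (· == '-'))
      rw [he] at this
      exact hs (this.mem (List.mem_cons_of_mem _ h))
    by_cases hcol : d = ':'
    · subst hcol
      simp only [List.foldl_cons, pvDfaStep]
      rw [if_neg (by simp), if_neg (by simp), if_pos (by simp), if_neg (by simp [hdd]),
        if_pos (by simp)]
      simpa using pv_dfa2_accept e hemem
    · simp only [List.foldl_cons, pvDfaStep]
      rw [if_neg (by simp [hd]), if_neg (by simp), if_pos (by simp), if_neg (by simp [hdd]),
        if_neg (by simp [hcol])]
      simp [pv_foldl_dfa3, hcol]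

-- A-side characterisation for a cell starting with '-' after colon-lstrip
lemma pv_rstrip_colon_char : ∀ (v : List Char), v.head? = some '-' →
    ((!(List.rdropWhile (· == ':') v).isEmpty && (List.rdropWhile (· == ':') v).all (· == '-'))
      = (v.dropWhile (· == '-')).all (· == ':')) := by
  intro v hv
  set d := v.takeWhile (· == '-') with hd
  set e := v.dropWhile (· == '-') with he
  have hde : d ++ e = v := List.takeWhile_append_dropWhile
  have hdne : d ≠ [] := by
    cases v with
    | nil => simp at hv
    | cons c t =>
      have : c = '-' := by simpa using hv
      subst this
      simp [hd, List.takeWhile_cons_of_pos]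
  have hdall : ∀ x ∈ d, (x == '-') = true := fun x hx =>
    List.mem_takeWhile_imp (p := (· == '-')) (l := v) (hd ▸ hx)
  by_cases hecol : e.all (· == ':') = true
  · -- both sides true
    have hrd : List.rdropWhile (· == ':') v = d := by
      rw [← hde, List.rdropWhile]
      rw [List.reverse_append, List.dropWhile_append]
      rw [if_pos (by
        simp only [List.isEmpty_iff, List.dropWhile_eq_nil_iff]
        intro x hx
        have : x ∈ e := by simpa using hx
        simpa using (List.all_eq_true.mp hecol) x this)]
      have hrev : List.dropWhile (· == ':') d.reverse = d.reverse := by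
        apply List.dropWhile_eq_self_iff.mpr
        intro hl
        have hmem : d.reverse[0] ∈ d := by
          have h3 := (List.getElem_mem _ : d.reverse[0] ∈ d.reverse)
          simp only [List.mem_reverse] at h3
          exact h3
        have hx : d.reverse[0] = '-' := by simpa using hdall _ hmem
        simp [hx]
      rw [hrev, List.reverse_reverse]
    rw [hrd, hecol]
    simp only [Bool.and_eq_true, Bool.not_eq_eq_eq_not]
    constructor
    · simpa using hdne
    · apply List.all_eq_true.mpr
      intro x hx
      exact hdall x hx
  · -- both sides false
    have hef : e.all (· == ':') = false := by simpa using hecol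
    rw [hef]
    by_contra hcon
    have hacc : (!(List.rdropWhile (· == ':') v).isEmpty
        && (List.rdropWhile (· == ':') v).all (· == '-')) = true := by
      cases h : (!(List.rdropWhile (· == ':') v).isEmpty
          && (List.rdropWhile (· == ':') v).all (· == '-')) with
      | true => rfl
      | false => exact absurd h hcon
    set D := List.rdropWhile (· == ':') v with hD
    set T := List.rtakeWhile (· == ':') v with hT
    have hDT : D ++ T = v := List.rdropWhile_append_rtakeWhile
    have hDall : ∀ x ∈ D, (x == '-') = true := by
      exact List.all_eq_true.mp (Bool.and_eq_true_iff.mp hacc).2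
    have hTall : ∀ x ∈ T, (x == ':') = true := fun x hx => List.mem_rtakeWhile_imp (p := (· == ':')) (l := v) (hT ▸ hx)
    -- then e = dropWhile dash (D ++ T) ⊆ T, so e is all colons: contradiction
    have : e.all (· == ':') = true := by
      rw [he, ← hDT, List.dropWhile_append]
      rw [if_pos (by
        simp only [List.isEmpty_iff, List.dropWhile_eq_nil_iff]
        intro x hx
        simpa using hDall x hx)]
      apply List.all_eq_true.mpr
      intro x hx
      exact hTall x ((List.dropWhile_sublist (l := T) (p := (· == '-'))).mem hx)
    rw [this] at hef
    exact absurd hef (by simp)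

-- per-cell equivalence over the space-free normalised character list
lemma pv_cell_core : ∀ (u : List Char), (' ' ∉ u) →
    ((!(((u.dropWhile (· == ':')).reverse.dropWhile (· == ':')).reverse.isEmpty
        || !(((u.dropWhile (· == ':')).reverse.dropWhile (· == ':')).reverse.all (· == '-'))))
      = (u.foldl pvDfaStep 0 == 1 || u.foldl pvDfaStep 0 == 2)) := by
  intro u hs
  rw [pv_foldl_dfa0_dropColon]
  have hvsub := List.dropWhile_sublist (l := u) (p := (· == ':'))
  cases hveq : u.dropWhile (· == ':') with
  | nil => rfl
  | cons c w =>
    rw [hveq] at hvsub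
    have hc : c ≠ ' ' := fun h => hs (hvsub.mem (h ▸ List.mem_cons_self ..))
    have hwsp : ' ' ∉ w := fun h => hs (hvsub.mem (List.mem_cons_of_mem _ h))
    have hccol : (c == ':') = false := by
      have h0 := List.head_dropWhile_not (· == ':') (l := u) (by simp [hveq])
      simp only [hveq, List.head_cons] at h0
      exact h0
    by_cases hcd : c = '-'
    · subst hcd
      have hB : (('-' :: w).foldl pvDfaStep 0 == 1 || ('-' :: w).foldl pvDfaStep 0 == 2)
          = (('-' :: w).dropWhile (· == '-')).all (· == ':') := by
        simp only [List.foldl_cons, pvDfaStep]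
        rw [if_neg (by simp), if_pos (by simp), if_neg (by simp), if_pos (by simp)]
        rw [List.dropWhile_cons_of_pos (by simp)]
        exact pv_dfa1_accept w hwsp
      have hform : (('-' :: w).reverse.dropWhile (· == ':')).reverse
          = List.rdropWhile (· == ':') ('-' :: w) := by simp [List.rdropWhile]
      rw [hform, hB, ← pv_rstrip_colon_char ('-' :: w) (by simp)]
      simp only [Bool.not_or, Bool.not_not]
    · -- reject on both sides
      have hstep : pvDfaStep 0 c = 3 := by
        simp only [pvDfaStep]
        rw [if_neg (by simp [hc]), if_pos (by simp), if_neg (by simpa using hccol),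
          if_neg (by simp [hcd])]
      have hBf : ((c :: w).foldl pvDfaStep 0 == 1 || (c :: w).foldl pvDfaStep 0 == 2) = false := by
        simp [List.foldl_cons, hstep, pv_foldl_dfa3]
      rw [hBf]
      -- A side: rdropWhile of (c :: w) is either empty or starts with c ≠ '-'
      have : ((c :: w).reverse.dropWhile (· == ':')).reverse = List.rdropWhile (· == ':') (c :: w) := by
        simp [List.rdropWhile]
      rw [this]
      cases hr : List.rdropWhile (· == ':') (c :: w) with
      | nil => rfl
      | cons r rs =>
        have hpre := List.rdropWhile_prefix (· == ':') (c :: w)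
        rw [hr] at hpre
        obtain ⟨s, hsuf⟩ := hpre
        have hrc : r = c := by
          have := hsuf
          simp at this
          exact this.1
      -- all '-' fails at the head
        subst hrc
        simp [hcd]

-- the two per-cell checks agree on every string
lemma pv_cell_eq : (fun c : String =>
      let t1 := PySem.Chars.strip c.toList
      let t2 := PySem.Chars.replace t1 [' '] []
      let t3 := t2.dropWhile (· == ':')
      let t4 := (t3.reverse.dropWhile (· == ':')).reverse
      !(t4.isEmpty || !(t4.all (· == '-')))) = pvCellOk := by
  funext c
  show ((!((((PySem.Chars.replace (PySem.Chars.strip c.toList) [' '] []).dropWhile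
          (· == ':')).reverse.dropWhile (· == ':')).reverse.isEmpty
      || !((((PySem.Chars.replace (PySem.Chars.strip c.toList) [' '] []).dropWhile
          (· == ':')).reverse.dropWhile (· == ':')).reverse.all (· == '-')))))
    = pvCellOk c
  rw [pvCellOk]
  rw [pv_foldl_dfa_filter (PySem.Chars.strip c.toList) 0, pv_replace_space]
  exact pv_cell_core ((PySem.Chars.strip c.toList).filter (fun ch => !(ch == ' ')))
    (fun h => by have h2 := (List.mem_filter.mp h).2; simp at h2)

-- ===== VERDICT (by name: the statement is the Claim_ definition above) =====
theorem is_gfm_table_separator_py_spec : Claim_equal_is_gfm_table_separator_py := by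
  intro cells _
  show is_gfm_table_separator_py cells = is_gfm_table_separator_py_alt cells
  rw [is_gfm_table_separator_py, is_gfm_table_separator_py_alt]
  cases hcells : cells.isEmpty with
  | true => rfl
  | false =>
    rw [if_neg (by simp), if_neg (by simp)]
    rw [pv_cell_eq]
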